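-- pv_equiv track=rewrite | github.com/itsp-ris/code-inventory | FIT3155-huffman-lempel-ziv-storer-szymanski-algorithm-assignment/task1/decoder_lzss.py | getUnits
-- ===== SOURCE A (Python) =====
-- def binToDec(string):
--     '''
--     function converts integers in binary to decimal
--     precondition:
--     :param: string: the bit string
--     postcondition:
--     :return:
--     complexity: time: best and worst: O(k) where k is the number of bits to represent the integer in binary
--                 space: O(k) where k is the number of bits to represent the integer in binary
--     error handling:
--     '''
--     return int(string, 2)
--
-- def getUnits(encoded, start=1):
--     '''
--     function retrieves the integer in binary from the encoded string and converts them to decimal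
--     precondition:
--     :param encoded: the encoded string
--            start: the starting position in the encoded string of the integer in binary
--     postcondition:
--     :return: the integer in binary
--     complexity: time: best and worst: O(k) where k is the number of bits to represent the integer in binary
--                 space: O(k) where k is the number of bits to represent the integer in binary
--     error handling:
--     '''
--     count = 2
--     string = ''
--     for i in range(start, len(encoded)):
--         string += encoded[i]
--         count -= 1
--         if count == 0:
--             if string[0] == '0':
--                 string = string.replace(string[0], '1', 1)
--                 count = binToDec(string) + 1
--                 string = ''
--             else:
--                 units = binToDec(string)
--                 return units, i + 1
-- ===== SOURCE B (Python) =====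
-- def getUnits(encoded, start=1):
--     pos = start
--     length = 2
--     while pos + length <= len(encoded):
--         group = encoded[pos:pos + length]
--         pos += length
--         if group[0] == '1':
--             return int(group, 2), pos
--         length = int('1' + group[1:], 2) + 1
--     return None
-- ===== Notes on version B (the rewrite author's own statement) =====
-- stated objective: simpler
-- what changed: Replaces the per-bit counter loop that accumulates a string character by character with a group-oriented loop that slices each whole Elias-omega group at once and advances the position by the group length.
-- outside the precondition, e.g. on getUnits('11', -2): A returns (3, 0), B raises IndexError; on getUnits('11x', 0): A returns (3, 2), B returns (3, 2); on getUnits('00a', 0): A returns None, B returns None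
import Mathlib
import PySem

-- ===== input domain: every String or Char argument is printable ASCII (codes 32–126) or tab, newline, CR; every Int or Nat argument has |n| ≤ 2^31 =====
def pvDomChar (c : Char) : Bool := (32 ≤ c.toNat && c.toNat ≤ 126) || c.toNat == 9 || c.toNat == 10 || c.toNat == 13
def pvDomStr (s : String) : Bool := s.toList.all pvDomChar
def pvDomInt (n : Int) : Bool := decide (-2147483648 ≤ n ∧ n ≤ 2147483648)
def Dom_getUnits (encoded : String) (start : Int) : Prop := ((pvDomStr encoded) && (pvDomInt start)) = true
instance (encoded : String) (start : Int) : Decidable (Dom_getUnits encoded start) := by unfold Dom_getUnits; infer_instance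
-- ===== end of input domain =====

-- B rewrites A's per-bit counter loop (string accumulated char by char, count decremented)
-- as a group-oriented loop that slices each whole Elias-omega group at once; same cost, simpler.

-- ===== PORT A =====

-- int(s, 2) (A's binToDec): PySem.Int.ofCharsBase? over the code points, none = ValueError
-- for i in range(start, len(encoded)): the loop, with early return; `count`/`string` are the loop state.
def getUnitsLoopA (enc : String) (is : List Int) (count : Int) (string : List Char) : Option (Int × Int) :=
  match is with
  | [] => none                                  -- loop exhausted: Python falls through, returns None
  | i :: rest =>
    match PySem.Str.pyGet? enc i with
    | none => none                              -- IndexError (outside Pre_)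
    | some c =>
      let string := string ++ [c]               -- string += encoded[i]
      let count := count - 1                    -- count -= 1
      if count = 0 then
        match string with
        | [] => none                            -- unreachable: string just received a char
        | c0 :: tail =>
          if c0 = '0' then
            -- string.replace(string[0], '1', 1): string[0] == '0' here, and its first
            -- occurrence is position 0, so this rewrites exactly the first char to '1'
            match PySem.Int.ofCharsBase? ('1' :: tail) 2 with
            | none => none                      -- ValueError (outside Pre_)
            | some v => getUnitsLoopA enc rest (v + 1) []
          else
            match PySem.Int.ofCharsBase? (c0 :: tail) 2 with
            | none => none                      -- ValueError (outside Pre_)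
            | some u => some (u, i + 1)         -- return units, i + 1
      else getUnitsLoopA enc rest count string

def getUnits (encoded : String) (start : Int) : Option (Int × Int) :=
  getUnitsLoopA encoded (PySem.List.pyRange start (PySem.Str.len encoded) 1) 2 []

-- ===== PORT B =====

-- while pos + length <= len(encoded).  The extra conjunct 0 < length is a totality guard only:
-- length is 2 at entry and int('1'+…,2)+1 ≥ 2 afterwards, so it is always true in Source B's runs.
def getUnitsLoopB (enc : String) (pos length : Int) : Option (Int × Int) :=
  if _h : 0 < length ∧ pos + length ≤ PySem.Str.len enc then
    match PySem.Chars.slice enc.toList (some pos) (some (pos + length)) with  -- group = encoded[pos:pos+length]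
    | [] => none                                -- group[0] IndexError (outside Pre_)
    | c0 :: tail =>
      if c0 = '1' then                          -- group[0] == '1'
        match PySem.Int.ofCharsBase? (c0 :: tail) 2 with
        | none => none                          -- ValueError (outside Pre_)
        | some u => some (u, pos + length)      -- return int(group, 2), pos (already advanced)
      else
        match PySem.Int.ofCharsBase? ('1' :: tail) 2 with  -- int('1' + group[1:], 2)
        | none => none                          -- ValueError (outside Pre_)
        | some v => getUnitsLoopB enc (pos + length) (v + 1)
  else none                                     -- loop ends: return None
termination_by (PySem.Str.len enc - pos).toNat
decreasing_by omega

def getUnits_alt (encoded : String) (start : Int) : Option (Int × Int) :=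
  getUnitsLoopB encoded start 2

-- ===== PRECONDITION & SPEC =====
-- Pre_ excludes negative start (negative-index wraparound / IndexError) and characters other
-- than the two binary digits at or after start when at least two characters remain there, on
-- which int(..., 2) raises ValueError except when the scan happens to stop before reaching them.
def Pre_getUnits (encoded : String) (start : Int) : Prop :=
  0 ≤ start ∧ (PySem.Str.len encoded ≤ start + 1 ∨
    ((encoded.toList.drop start.toNat).all (fun c => c == '0' || c == '1')) = true)
instance (encoded : String) (start : Int) : Decidable (Pre_getUnits encoded start) := by
  unfold Pre_getUnits; infer_instance

def pvWitness_getUnits : String × Int := ("0011101", 0)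

def Spec_getUnits (encoded : String) (start : Int) (out : Option (Int × Int)) : Prop := out = getUnits_alt encoded start
instance (encoded : String) (start : Int) (out : Option (Int × Int)) : Decidable (Spec_getUnits encoded start out) := by unfold Spec_getUnits; infer_instance

-- ===== CLAIM (what is proved, stated in full; the proofs are below) =====
def Claim_equal_getUnits : Prop := ∀ (encoded : String) (start : Int), Dom_getUnits encoded start → Pre_getUnits encoded start → Spec_getUnits encoded start (getUnits encoded start)

-- ===== LEMMAS AND PROOFS =====

-- What A's loop does at the moment count hits 0, having accumulated the group g; proof helper.
def stepA (enc : String) (g : List Char) (newpos : Int) : Option (Int × Int) :=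
  match g with
  | [] => none
  | c0 :: tail =>
    if c0 = '0' then
      match PySem.Int.ofCharsBase? ('1' :: tail) 2 with
      | none => none
      | some v => getUnitsLoopA enc (PySem.List.pyRange newpos (PySem.Str.len enc) 1) (v + 1) []
    else
      match PySem.Int.ofCharsBase? (c0 :: tail) 2 with
      | none => none
      | some u => some (u, newpos)

-- With a nonpositive count, A's loop can never fire its count == 0 branch.
lemma loopA_nonpos (enc : String) : ∀ (is : List Int) (count : Int) (s : List Char),
    count ≤ 0 → getUnitsLoopA enc is count s = none := by
  intro is
  induction is with
  | nil => intro _ _ _; rfl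
  | cons i rest ih =>
    intro count s hc
    simp only [getUnitsLoopA]
    cases PySem.Str.pyGet? enc i with
    | none => rfl
    | some c =>
      simp only []
      rw [if_neg (by omega)]
      exact ih _ _ (by omega)

-- A's loop with count j and accumulator s0 consumes exactly the next j characters (if present)
-- and then performs stepA on the completed group.
lemma loopA_consume (enc : String) : ∀ (j : Nat) (i : Int) (s0 : List Char), 0 ≤ i → 1 ≤ j →
    getUnitsLoopA enc (PySem.List.pyRange i (PySem.Str.len enc) 1) (j : Int) s0 =
      if i + (j : Int) ≤ PySem.Str.len enc then
        stepA enc (s0 ++ (enc.toList.drop i.toNat).take j) (i + (j : Int))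
      else none := by
  intro j
  induction j with
  | zero => omega
  | succ j ih =>
    intro i s0 hi _
    by_cases hlt : i < PySem.Str.len enc
    · have hilen : i.toNat < enc.toList.length := by
        simp only [PySem.Str.len_eq] at hlt; omega
      have hget : PySem.Str.pyGet? enc i = some enc.toList[i.toNat] := by
        simp only [PySem.Str.pyGet?_eq]
        exact PySem.List.pyGet?_eq_some_getElem enc.toList hi (by simpa [PySem.Str.len_eq] using hlt)
      have hdrop : enc.toList.drop i.toNat = enc.toList[i.toNat] :: enc.toList.drop (i.toNat + 1) :=
        List.drop_eq_getElem_cons hilen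
      rw [PySem.List.pyRange_one_cons hlt]
      simp only [getUnitsLoopA, hget]
      by_cases hj : j = 0
      · subst hj
        rw [if_pos (by norm_num)]
        rw [if_pos (by push_cast; omega)]
        simp only [hdrop, List.take_succ_cons, List.take_zero]
        norm_num [stepA]
      · rw [if_neg (by push_cast; omega)]
        have : ((j : Int) + 1) - 1 = (j : Int) := by omega
        rw [show ((Nat.succ j : Nat) : Int) - 1 = (j : Int) by push_cast; omega]
        rw [ih (i + 1) (s0 ++ [enc.toList[i.toNat]]) (by omega) (by omega)]
        have hpos : i + 1 + (j : Int) = i + ((j : Nat).succ : Int) := by push_cast; omega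
        have htn : (i + 1).toNat = i.toNat + 1 := by omega
        rw [htn, hpos]
        have hgrp : (s0 ++ [enc.toList[i.toNat]]) ++ (enc.toList.drop (i.toNat + 1)).take j
            = s0 ++ (enc.toList.drop i.toNat).take (j + 1) := by
          rw [hdrop, List.take_succ_cons, List.append_assoc]; rfl
        rw [hgrp]
    · rw [PySem.List.pyRange_one_eq_nil (by omega)]
      rw [if_neg (by push_cast; omega)]
      rfl

-- Main invariant: from any position p ≥ 0 with only '0'/'1' characters from p on,
-- A's per-bit loop and B's group loop agree for every pending group size k.
lemma loop_equiv (enc : String) (p k : Int) (hp : 0 ≤ p)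
    (hbin : ∀ c ∈ enc.toList.drop p.toNat, c = '0' ∨ c = '1') :
    getUnitsLoopA enc (PySem.List.pyRange p (PySem.Str.len enc) 1) k [] =
      getUnitsLoopB enc p k := by
  by_cases hk : k ≤ 0
  · rw [loopA_nonpos enc _ _ _ hk, getUnitsLoopB]
    rw [dif_neg (by omega)]
  · obtain ⟨j, rfl⟩ : ∃ j : Nat, k = (j : Int) := ⟨k.toNat, by omega⟩
    have hj1 : 1 ≤ j := by omega
    rw [loopA_consume enc j p [] hp hj1]
    by_cases hle : p + (j : Int) ≤ PySem.Str.len enc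
    · rw [if_pos hle, getUnitsLoopB, dif_pos ⟨by omega, hle⟩]
      have hslice : PySem.Chars.slice enc.toList (some p) (some (p + (j : Int))) =
          (enc.toList.drop p.toNat).take j := by
        rw [PySem.Chars.slice_eq_listSlice, PySem.List.slice_toNat enc.toList hp (by omega)]
        congr 1; omega
      rw [hslice]
      simp only [List.nil_append]
      rcases hg : (enc.toList.drop p.toNat).take j with _ | ⟨c0, tail⟩
      · simp [stepA]
      · have hc0 : c0 = '0' ∨ c0 = '1' :=
          hbin c0 (List.take_subset _ _ (hg ▸ List.mem_cons_self))
        have hbin' : ∀ c ∈ enc.toList.drop (p + (j : Int)).toNat, c = '0' ∨ c = '1' := by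
          intro c hc
          apply hbin
          have hpj : (p + (j : Int)).toNat = p.toNat + j := by omega
          rw [hpj, ← List.drop_drop] at hc
          exact List.drop_subset _ _ hc
        rcases hc0 with rfl | rfl
        · simp only [stepA, if_true]
          rw [if_neg (by decide : ¬ ('0' : Char) = '1')]
          cases PySem.Int.ofCharsBase? ('1' :: tail) 2 with
          | none => rfl
          | some v => exact loop_equiv enc (p + (j : Int)) (v + 1) (by omega) hbin'
        · simp only [stepA, if_true]
          rw [if_neg (by decide : ¬ ('1' : Char) = '0')]
    · rw [if_neg hle, getUnitsLoopB, dif_neg (by omega)]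
termination_by (PySem.Str.len enc - p).toNat
decreasing_by omega

-- With at most one character at or after start, both loops run out before any group completes.
lemma short_none (enc : String) (start : Int) (hs : PySem.Str.len enc ≤ start + 1) :
    getUnits enc start = getUnits_alt enc start := by
  unfold getUnits getUnits_alt
  rw [getUnitsLoopB, dif_neg (by omega)]
  by_cases hlt : start < PySem.Str.len enc
  · rw [PySem.List.pyRange_one_cons hlt]
    simp only [getUnitsLoopA]
    cases PySem.Str.pyGet? enc start with
    | none => rfl
    | some c =>
      simp only []
      rw [if_neg (by norm_num), PySem.List.pyRange_one_eq_nil (by omega)]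
      rfl
  · rw [PySem.List.pyRange_one_eq_nil (by omega)]
    rfl

-- ===== VERDICT (by name: the statement is the Claim_ definition above) =====
theorem getUnits_spec : Claim_equal_getUnits := by
  intro encoded start _ hpre
  obtain ⟨h0, hshort | hall⟩ := hpre
  · unfold Spec_getUnits
    exact short_none encoded start hshort
  · have hbin : ∀ c ∈ encoded.toList.drop start.toNat, c = '0' ∨ c = '1' := by
      intro c hc
      simpa using List.all_eq_true.mp hall c hc
    unfold Spec_getUnits getUnits getUnits_alt
    exact loop_equiv encoded start 2 h0 hbin
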